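-- pv_equiv track=rewrite | github.com/k30035600/lotto023 | utils/verify_lotto023_round.py | calculate_ac
-- ===== SOURCE A (Python) =====
-- def calculate_ac(numbers):
--     """AC (Alternating Count) 계산"""
--     if len(numbers) != 6:
--         return 0
--     sorted_nums = sorted(numbers)
--     ac = 0
--     for i in range(5):
--         for j in range(i + 1, 6):
--             if sorted_nums[j] - sorted_nums[i] > 1:
--                 ac += 1
--     return ac
-- ===== SOURCE B (Python) =====
-- def _bisect_gt(s, x):
--     # first index idx with s[idx] > x in the sorted list s (hand-written
--     # binary search: the task forbids importing bisect here)
--     lo, hi = 0, len(s)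
--     while lo < hi:
--         mid = (lo + hi) // 2
--         if s[mid] <= x:
--             lo = mid + 1
--         else:
--             hi = mid
--     return lo
--
-- def calculate_ac(numbers):
--     if len(numbers) != 6:
--         return 0
--     s = sorted(numbers)
--     # pairs (i, j), i < j, with s[j] - s[i] > 1: for each of the first five
--     # elements x the partners form the suffix after the last element <= x + 1,
--     # found by binary search instead of an inner comparison loop.
--     return sum(6 - _bisect_gt(s, x + 1) for x in s[:5])
-- ===== Notes on version B (the rewrite author's own statement) =====
-- stated objective: alternative
-- what changed: Replaces the nested pairwise comparison loops with, for each of the first five sorted elements, a hand-written binary search (bisect_right-style) locating the start of the suffix of partners farther than 1, summing the suffix lengths.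
import Mathlib
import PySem

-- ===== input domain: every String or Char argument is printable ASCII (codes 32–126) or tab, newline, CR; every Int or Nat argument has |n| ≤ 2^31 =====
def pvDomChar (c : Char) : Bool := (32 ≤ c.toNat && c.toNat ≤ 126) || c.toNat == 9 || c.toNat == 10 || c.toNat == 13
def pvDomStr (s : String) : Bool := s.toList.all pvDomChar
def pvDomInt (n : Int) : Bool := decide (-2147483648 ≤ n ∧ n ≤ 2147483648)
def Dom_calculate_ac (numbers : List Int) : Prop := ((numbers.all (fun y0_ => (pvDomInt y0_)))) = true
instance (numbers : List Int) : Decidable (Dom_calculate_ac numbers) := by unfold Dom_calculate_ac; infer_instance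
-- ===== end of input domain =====

-- B replaces A's nested comparison loops by a per-element binary search over the
-- sorted list (alternative decomposition; the count is provably identical).

-- ===== PORT A =====
-- the loop indices are always in range for a length-6 list, so pyGetD with
-- default 0 is exact here
def calculate_ac (numbers : List Int) : Int :=
  if numbers.length ≠ 6 then 0
  else
    let sorted_nums := PySem.List.sorted numbers id
    (PySem.List.pyRange 0 5 1).foldl (fun ac i =>
      (PySem.List.pyRange (i + 1) 6 1).foldl (fun ac j =>
        if PySem.List.pyGetD sorted_nums j 0 - PySem.List.pyGetD sorted_nums i 0 > 1
        then ac + 1 else ac) ac) 0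

-- ===== PORT B =====
-- Source B's hand-written binary-search loop _bisect_gt; the fuel argument only makes
-- the while-loop structurally terminating (hi - lo shrinks on every iteration, so
-- s.length iterations always suffice); s[mid] is in range, so pyGetD is exact, and
-- (lo + hi) // 2 on the nonnegative lo, hi is Nat division, equal to Python's //
def pvBisectGtLoop (s : List Int) (x : Int) : Nat → Nat → Nat → Nat
  | 0, lo, _ => lo
  | fuel + 1, lo, hi =>
    if lo < hi then
      let mid := (lo + hi) / 2
      if PySem.List.pyGetD s (mid : Int) 0 ≤ x then
        pvBisectGtLoop s x fuel (mid + 1) hi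
      else
        pvBisectGtLoop s x fuel lo mid
    else lo

def pvBisectGt (s : List Int) (x : Int) : Nat :=
  pvBisectGtLoop s x s.length 0 s.length

def calculate_ac_alt (numbers : List Int) : Int :=
  if numbers.length ≠ 6 then 0
  else
    let s := PySem.List.sorted numbers id
    ((PySem.List.slice s none (some 5)).map
      (fun x => (6 : Int) - (pvBisectGt s (x + 1) : Int))).sum

-- ===== PRECONDITION & SPEC =====
def Spec_calculate_ac (numbers : List Int) (out : Int) : Prop := out = calculate_ac_alt numbers
instance (numbers : List Int) (out : Int) : Decidable (Spec_calculate_ac numbers out) := by unfold Spec_calculate_ac; infer_instance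

-- ===== CLAIM (what is proved, stated in full; the proofs are below) =====
def Claim_equal_calculate_ac : Prop := ∀ (numbers : List Int), Dom_calculate_ac numbers → Spec_calculate_ac numbers (calculate_ac numbers)

-- ===== LEMMAS AND PROOFS =====
-- Row lemmas: for each i, A's inner loop over j ∈ range(i+1, 6) adds to the
-- accumulator exactly B's term 6 - _bisect_gt(s, s[i] + 1), given the sorted chain.
theorem pvRow0 (a b c d e f : Int) (h1 : a ≤ b) (h2 : b ≤ c) (h3 : c ≤ d) (h4 : d ≤ e) (h5 : e ≤ f) (ac : Int) :
    List.foldl (fun ac j => if PySem.List.pyGetD [a,b,c,d,e,f] j 0 - PySem.List.pyGetD [a,b,c,d,e,f] 0 0 > 1 then ac + 1 else ac) ac (PySem.List.pyRange (0+1) 6)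
    = ac + ((6:Int) - (pvBisectGt [a,b,c,d,e,f] (a+1) : Int)) := by
  simp only [show PySem.List.pyRange (0+1) 6 = [1,2,3,4,5] from by decide, List.foldl_cons, List.foldl_nil]
  simp [pysem, pvBisectGt, pvBisectGtLoop]
  split_ifs <;> omega

theorem pvRow1 (a b c d e f : Int) (h2 : b ≤ c) (h3 : c ≤ d) (h4 : d ≤ e) (h5 : e ≤ f) (ac : Int) :
    List.foldl (fun ac j => if PySem.List.pyGetD [a,b,c,d,e,f] j 0 - PySem.List.pyGetD [a,b,c,d,e,f] 1 0 > 1 then ac + 1 else ac) ac (PySem.List.pyRange (1+1) 6)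
    = ac + ((6:Int) - (pvBisectGt [a,b,c,d,e,f] (b+1) : Int)) := by
  simp only [show PySem.List.pyRange (1+1) 6 = [2,3,4,5] from by decide, List.foldl_cons, List.foldl_nil]
  simp [pysem, pvBisectGt, pvBisectGtLoop]
  split_ifs <;> omega

theorem pvRow2 (a b c d e f : Int) (h2 : b ≤ c) (h3 : c ≤ d) (h4 : d ≤ e) (h5 : e ≤ f) (ac : Int) :
    List.foldl (fun ac j => if PySem.List.pyGetD [a,b,c,d,e,f] j 0 - PySem.List.pyGetD [a,b,c,d,e,f] 2 0 > 1 then ac + 1 else ac) ac (PySem.List.pyRange (2+1) 6)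
    = ac + ((6:Int) - (pvBisectGt [a,b,c,d,e,f] (c+1) : Int)) := by
  simp only [show PySem.List.pyRange (2+1) 6 = [3,4,5] from by decide, List.foldl_cons, List.foldl_nil]
  simp [pysem, pvBisectGt, pvBisectGtLoop]
  split_ifs <;> omega

theorem pvRow3 (a b c d e f : Int) (h4 : d ≤ e) (h5 : e ≤ f) (ac : Int) :
    List.foldl (fun ac j => if PySem.List.pyGetD [a,b,c,d,e,f] j 0 - PySem.List.pyGetD [a,b,c,d,e,f] 3 0 > 1 then ac + 1 else ac) ac (PySem.List.pyRange (3+1) 6)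
    = ac + ((6:Int) - (pvBisectGt [a,b,c,d,e,f] (d+1) : Int)) := by
  simp only [show PySem.List.pyRange (3+1) 6 = [4,5] from by decide, List.foldl_cons, List.foldl_nil]
  simp [pysem, pvBisectGt, pvBisectGtLoop]
  split_ifs <;> omega

theorem pvRow4 (a b c d e f : Int) (h4 : d ≤ e) (h5 : e ≤ f) (ac : Int) :
    List.foldl (fun ac j => if PySem.List.pyGetD [a,b,c,d,e,f] j 0 - PySem.List.pyGetD [a,b,c,d,e,f] 4 0 > 1 then ac + 1 else ac) ac (PySem.List.pyRange (4+1) 6)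
    = ac + ((6:Int) - (pvBisectGt [a,b,c,d,e,f] (e+1) : Int)) := by
  simp only [show PySem.List.pyRange (4+1) 6 = [5] from by decide, List.foldl_cons, List.foldl_nil]
  simp [pysem, pvBisectGt, pvBisectGtLoop]
  split_ifs <;> omega

-- ===== VERDICT (by name: the statement is the Claim_ definition above) =====
theorem calculate_ac_spec : Claim_equal_calculate_ac := by
  intro numbers _
  unfold Spec_calculate_ac calculate_ac calculate_ac_alt
  by_cases h : numbers.length = 6
  · simp only [h, ne_eq, not_true_eq_false, if_false]
    have hs : (PySem.List.sorted numbers id).length = 6 := by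
      rw [PySem.List.length_sorted, h]
    have hp := PySem.List.sorted_pairwise numbers id
    set s := PySem.List.sorted numbers id with hsdef
    clear_value s
    rcases s with _|⟨a,_|⟨b,_|⟨c,_|⟨d,_|⟨e,_|⟨f,_|⟨g,t⟩⟩⟩⟩⟩⟩⟩ <;> simp at hs
    simp [List.pairwise_cons] at hp
    obtain ⟨h1,h2,h3,h4,h5⟩ := hp
    simp only [show PySem.List.pyRange 0 5 = [0,1,2,3,4] from by decide,
      List.foldl_cons, List.foldl_nil]
    rw [pvRow0 a b c d e f h1.1 h2.1 h3.1 h4.1 h5, pvRow1 a b c d e f h2.1 h3.1 h4.1 h5,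
        pvRow2 a b c d e f h2.1 h3.1 h4.1 h5, pvRow3 a b c d e f h4.1 h5,
        pvRow4 a b c d e f h4.1 h5]
    rw [show PySem.List.slice [a,b,c,d,e,f] none (some 5) = [a,b,c,d,e] from by
      rw [PySem.List.slice_to (xs:=[a,b,c,d,e,f]) (b:=5) (by norm_num)]; rfl]
    simp only [List.map_cons, List.map_nil, List.sum_cons, List.sum_nil]
    ring
  · simp [h]
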